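-- pv_equiv track=rewrite | github.com/SonyCSLParis/concept_map | src/postprocess.py | remove_redundant_triples
-- ===== SOURCE A (Python) =====
-- from typing import Dict, List
--
-- def remove_redundant_triples(triples: Dict[str, List[tuple]]) -> Dict[str, List[tuple]]:
--     """ Find unique triples """
--     processed_triples = {}
--     for category, values in triples.items():
--         unique_triples = []
--         for triple in values:
--             elements = triple
--             unique_elements = set(elements)
--             if len(unique_elements) == 3:
--                 # Check for overlapping of elements in the triple
--                 overlap_threshold = 0.6
--                 for existing_triple in unique_triples:
--                     existing_elements = existing_triple
--                     overlap_count = sum(1 for element in elements if element in existing_elements)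
--                     if overlap_count / len(unique_elements) >= overlap_threshold:
--                         # If overlap exceeds 60%, skip the triple
--                         break
--                 else:
--                     # If no overlap exceeds 60%, add the triple to unique triples
--                     unique_triples.append(elements)
--         processed_triples[category] = unique_triples
--     return processed_triples
-- ===== SOURCE B (Python) =====
-- from typing import Dict, List
--
-- def remove_redundant_triples(triples: Dict[str, List[tuple]]) -> Dict[str, List[tuple]]:
--     """ Find unique triples: keep a triple only when no two of its elements
--     already co-occur in a previously kept triple of the same category. """
--     processed_triples = {}
--     for category, values in triples.items():
--         unique_triples = []
--         pairs_seen = set()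
--         for triple in values:
--             if len(set(triple)) != 3:
--                 continue
--             if _cooccurs(list(triple), pairs_seen):
--                 continue
--             unique_triples.append(triple)
--             pairs_seen.update((x, y) for x in triple for y in triple)
--         processed_triples[category] = unique_triples
--     return processed_triples
--
-- def _cooccurs(elements, pairs_seen):
--     """Do two of the elements (by position) already co-occur in a kept triple?"""
--     if not elements:
--         return False
--     x, rest = elements[0], elements[1:]
--     return any((x, y) in pairs_seen for y in rest) or _cooccurs(rest, pairs_seen)
-- ===== Notes on version B (the rewrite author's own statement) =====
-- stated objective: alternative
-- what changed: Instead of re-scanning every previously accepted triple per candidate, B keeps one hash set of all element pairs co-occurring in accepted triples and decides acceptance by pair-membership lookups only.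
import Mathlib
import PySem

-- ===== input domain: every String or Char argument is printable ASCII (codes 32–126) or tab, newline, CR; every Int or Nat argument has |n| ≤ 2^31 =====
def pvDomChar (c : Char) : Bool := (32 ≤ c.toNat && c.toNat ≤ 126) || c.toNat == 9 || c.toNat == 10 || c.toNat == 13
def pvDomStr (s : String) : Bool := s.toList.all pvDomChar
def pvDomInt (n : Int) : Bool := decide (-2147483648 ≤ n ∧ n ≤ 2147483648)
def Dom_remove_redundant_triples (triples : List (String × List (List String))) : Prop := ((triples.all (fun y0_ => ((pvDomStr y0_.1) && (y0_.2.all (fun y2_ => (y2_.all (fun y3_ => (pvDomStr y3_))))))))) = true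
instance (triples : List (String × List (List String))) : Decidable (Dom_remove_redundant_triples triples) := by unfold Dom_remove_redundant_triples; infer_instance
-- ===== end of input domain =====

-- B replaces A's per-candidate rescan of all accepted triples by one hash set of the
-- element pairs co-occurring in accepted triples (objective: alternative).


-- ===== PORT A =====
-- inner loop of A over one category's values (for/else over unique_triples ≡ List.any);
-- the float comparison 'overlap_count / len(unique_elements) >= 0.6' is ported exactly as
-- '6 * len ≤ 10 * overlap': for integer overlap and len = 3 the double rounding never hits
-- the boundary, so the two tests agree on every input.
def pvUniqA (values : List (List String)) : List (List String) :=
  values.foldl (fun unique triple =>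
    let uniqueElements : PySem.Set String := PySem.Set.ofList triple
    if PySem.Set.len uniqueElements = 3 then
      if unique.any (fun existing =>
            6 * PySem.Set.len uniqueElements
              ≤ 10 * ((triple.countP (fun e => existing.contains e) : Int))) then
        unique
      else unique ++ [triple]
    else unique) []

def remove_redundant_triples (triples : List (String × List (List String))) : List (String × List (List String)) :=
  (triples.foldl (fun acc cv => acc.insert cv.1 (pvUniqA cv.2)) PySem.Dict.empty).items

-- ===== PORT B =====
-- _cooccurs of Source B: head/tail recursion, 'any((x, y) in pairs_seen for y in rest)'
def pvCooccurs (elements : List String) (pairs_seen : PySem.Set (String × String)) : Bool :=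
  match elements with
  | [] => false
  | x :: rest => rest.any (fun y => pairs_seen.contains (x, y)) || pvCooccurs rest pairs_seen

-- one iteration of B's inner loop: state = (unique_triples, pairs_seen)
def pvStepB (st : List (List String) × PySem.Set (String × String)) (triple : List String) :
    List (List String) × PySem.Set (String × String) :=
  if PySem.Set.len (PySem.Set.ofList triple) ≠ 3 then st
  else if pvCooccurs triple st.2 then st
  else (st.1 ++ [triple],
        PySem.Set.update st.2 (triple.flatMap (fun x => triple.map (fun y => (x, y)))))

def pvUniqB (values : List (List String)) : List (List String) :=
  (values.foldl pvStepB ([], PySem.Set.empty)).1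

def remove_redundant_triples_alt (triples : List (String × List (List String))) : List (String × List (List String)) :=
  (triples.foldl (fun acc cv => acc.insert cv.1 (pvUniqB cv.2)) PySem.Dict.empty).items

-- ===== PRECONDITION & SPEC =====
def Spec_remove_redundant_triples (triples : List (String × List (List String))) (out : List (String × List (List String))) : Prop := out = remove_redundant_triples_alt triples
instance (triples : List (String × List (List String))) (out : List (String × List (List String))) : Decidable (Spec_remove_redundant_triples triples out) := by unfold Spec_remove_redundant_triples; infer_instance

-- ===== CLAIM (what is proved, stated in full; the proofs are below) =====
def Claim_equal_remove_redundant_triples : Prop := ∀ (triples : List (String × List (List String))), Dom_remove_redundant_triples triples → Spec_remove_redundant_triples triples (remove_redundant_triples triples)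

-- ===== LEMMAS AND PROOFS =====

-- A's per-triple step, named so the fold can be reasoned about
def pvStepA (unique : List (List String)) (triple : List String) : List (List String) :=
  let uniqueElements : PySem.Set String := PySem.Set.ofList triple
  if PySem.Set.len uniqueElements = 3 then
    if unique.any (fun existing =>
          6 * PySem.Set.len uniqueElements
            ≤ 10 * ((triple.countP (fun e => existing.contains e) : Int))) then
      unique
    else unique ++ [triple]
  else unique

theorem pvUniqA_foldl (values : List (List String)) :
    pvUniqA values = values.foldl pvStepA [] := rfl

-- invariant: pairs_seen holds exactly the pairs co-occurring in an accepted triple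
def pvInv (uniq : List (List String)) (pairs : PySem.Set (String × String)) : Prop :=
  ∀ x y : String, (x, y) ∈ pairs ↔ ∃ t ∈ uniq, x ∈ t ∧ y ∈ t

-- under the invariant, _cooccurs ⇔ some accepted triple contains ≥ 2 of the elements
-- (counted with multiplicity, as A's countP does)
theorem pvCooccurs_iff (l : List String) (uniq : List (List String))
    (pairs : PySem.Set (String × String)) (hinv : pvInv uniq pairs) :
    (pvCooccurs l pairs = true) ↔
      ∃ t ∈ uniq, 2 ≤ l.countP (fun e => t.contains e) := by
  induction l with
  | nil => simp [pvCooccurs]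
  | cons x rest ih =>
    simp only [pvCooccurs, Bool.or_eq_true, List.any_eq_true, PySem.Set.contains_iff, ih,
      List.countP_cons]
    constructor
    · rintro (⟨y, hy, hmem⟩ | ⟨t, ht, hc⟩)
      · obtain ⟨t, ht, hxt, hyt⟩ := (hinv x y).1 hmem
        refine ⟨t, ht, ?_⟩
        have h1 : 0 < List.countP (fun e => t.contains e) rest :=
          List.countP_pos_iff.2 ⟨y, hy, by simpa using hyt⟩
        have hx' : t.contains x = true := by simpa using hxt
        rw [if_pos hx']; omega
      · refine ⟨t, ht, ?_⟩
        by_cases hx' : t.contains x = true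
        · rw [if_pos hx']; omega
        · rw [if_neg hx']; omega
    · rintro ⟨t, ht, hc⟩
      by_cases hx' : t.contains x = true
      · rw [if_pos hx'] at hc
        by_cases h2 : 2 ≤ List.countP (fun e => t.contains e) rest
        · exact Or.inr ⟨t, ht, h2⟩
        · have h1 : 0 < List.countP (fun e => t.contains e) rest := by omega
          obtain ⟨y, hy, hyt⟩ := List.countP_pos_iff.1 h1
          exact Or.inl ⟨y, hy, (hinv x y).2 ⟨t, ht, by simpa using hx', by simpa using hyt⟩⟩
      · rw [if_neg hx'] at hc
        exact Or.inr ⟨t, ht, hc⟩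

theorem pvFold_eq (values : List (List String)) (uniq : List (List String))
    (pairs : PySem.Set (String × String)) (hinv : pvInv uniq pairs) :
    (values.foldl pvStepB (uniq, pairs)).1 = values.foldl pvStepA uniq := by
  induction values generalizing uniq pairs with
  | nil => rfl
  | cons triple rest ih =>
    simp only [List.foldl_cons]
    by_cases hlen : PySem.Set.len (PySem.Set.ofList triple) = 3
    · -- the two skip conditions agree
      have hcond : (pvCooccurs triple pairs = true) ↔
          (uniq.any (fun existing =>
            6 * PySem.Set.len (PySem.Set.ofList triple)
              ≤ 10 * ((triple.countP (fun e => existing.contains e) : Int))) = true) := by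
        rw [pvCooccurs_iff triple uniq pairs hinv]
        simp only [List.any_eq_true, decide_eq_true_eq, hlen]
        constructor
        · rintro ⟨t, ht, hc⟩; exact ⟨t, ht, by push_cast; omega⟩
        · rintro ⟨t, ht, hc⟩
          refine ⟨t, ht, ?_⟩
          have := hc; push_cast at this; omega
      by_cases hskip : pvCooccurs triple pairs = true
      · have hA : pvStepA uniq triple = uniq := by
          simp only [pvStepA]
          rw [if_pos hlen, if_pos (hcond.1 hskip)]
        have hB : pvStepB (uniq, pairs) triple = (uniq, pairs) := by
          simp only [pvStepB]
          rw [if_neg (by omega), if_pos hskip]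
        rw [hB, hA]; exact ih uniq pairs hinv
      · have hA : pvStepA uniq triple = uniq ++ [triple] := by
          simp only [pvStepA]
          rw [if_pos hlen, if_neg (fun h => hskip (hcond.2 h))]
        have hB : pvStepB (uniq, pairs) triple =
            (uniq ++ [triple],
             PySem.Set.update pairs (triple.flatMap (fun x => triple.map (fun y => (x, y))))) := by
          simp only [pvStepB]
          rw [if_neg (by omega), if_neg hskip]
        rw [hB, hA]
        refine ih _ _ ?_
        intro x y
        rw [PySem.Set.mem_update, hinv]
        simp only [List.mem_flatMap, List.mem_map, List.mem_append, List.mem_singleton]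
        constructor
        · rintro (⟨t, ht, hx, hy⟩ | ⟨u, hu, v, hv, huv⟩)
          · exact ⟨t, Or.inl ht, hx, hy⟩
          · injection huv with h1 h2; subst h1; subst h2
            exact ⟨triple, Or.inr rfl, hu, hv⟩
        · rintro ⟨t, ht | rfl, hx, hy⟩
          · exact Or.inl ⟨t, ht, hx, hy⟩
          · exact Or.inr ⟨x, hx, y, hy, rfl⟩
    · have hA : pvStepA uniq triple = uniq := by
        simp only [pvStepA]; rw [if_neg hlen]
      have hB : pvStepB (uniq, pairs) triple = (uniq, pairs) := by
        simp only [pvStepB]; rw [if_pos hlen]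
      rw [hB, hA]; exact ih uniq pairs hinv

theorem pvUniq_eq (values : List (List String)) : pvUniqB values = pvUniqA values := by
  rw [pvUniqA_foldl, pvUniqB]
  exact pvFold_eq values [] PySem.Set.empty (by intro x y; simp [PySem.Set.empty])

-- ===== VERDICT (by name: the statement is the Claim_ definition above) =====
theorem remove_redundant_triples_spec : Claim_equal_remove_redundant_triples := by
  intro triples _
  unfold Spec_remove_redundant_triples remove_redundant_triples remove_redundant_triples_alt
  simp only [pvUniq_eq]
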